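-- pv_equiv track=rewrite | github.com/Signalpilot/signalpilot-education-hub | scripts/standardize_closing_order.py | reorder_sections
-- ===== SOURCE A (Python) =====
-- TARGET_ORDER = [
--     'key-takeaway',      # Key Takeaways
--     'Practice Exercise', # Practice Exercise
--     'Test Your',         # Test Your Knowledge/Understanding
--     'Related Lessons',   # Related Lessons
--     'Downloadable'       # Downloadable Resources
-- ]
--
-- def reorder_sections(sections):
--     """Reorder sections according to TARGET_ORDER"""
--     ordered = []
--
--     for target_type in TARGET_ORDER:
--         for section in sections:
--             if section['type'] == target_type:
--                 ordered.append(section)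
--                 break  # Only take the first match of each type
--
--     return ordered
-- ===== SOURCE B (Python) =====
-- TARGET_ORDER = [
--     'key-takeaway',
--     'Practice Exercise',
--     'Test Your',
--     'Related Lessons',
--     'Downloadable'
-- ]
--
-- def reorder_sections(sections):
--     """Reorder sections according to TARGET_ORDER: one indexing pass, then one lookup pass."""
--     index = {}
--     for section in sections:
--         t = section['type']
--         if t not in index:
--             index[t] = section
--     return [index[t] for t in TARGET_ORDER if t in index]
-- ===== Notes on version B (the rewrite author's own statement) =====
-- stated objective: idiomatic
-- what changed: Replaced the nested scan (one full pass over sections per target type) by a single indexing pass recording the first section of each type in a dict, followed by one lookup pass over TARGET_ORDER.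
import Mathlib
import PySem

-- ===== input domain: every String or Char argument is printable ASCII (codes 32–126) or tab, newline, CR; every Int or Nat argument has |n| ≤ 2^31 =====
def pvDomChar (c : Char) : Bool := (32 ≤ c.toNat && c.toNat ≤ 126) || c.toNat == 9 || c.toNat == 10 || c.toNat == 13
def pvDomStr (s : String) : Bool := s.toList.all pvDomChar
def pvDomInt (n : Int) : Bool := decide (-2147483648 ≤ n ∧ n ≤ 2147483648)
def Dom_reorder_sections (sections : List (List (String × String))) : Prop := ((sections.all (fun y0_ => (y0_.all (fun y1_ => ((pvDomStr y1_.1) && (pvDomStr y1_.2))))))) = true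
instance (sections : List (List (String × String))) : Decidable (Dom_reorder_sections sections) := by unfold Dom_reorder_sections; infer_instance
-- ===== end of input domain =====

-- B builds a first-occurrence index of sections by type in one pass, then looks the fixed
-- TARGET_ORDER up in it, instead of A's one full scan of `sections` per target type.

-- ===== PORT A =====
def TARGET_ORDER : List String :=
  ["key-takeaway", "Practice Exercise", "Test Your", "Related Lessons", "Downloadable"]

-- section['type']: first-match lookup in the association list (none = KeyError, excluded by Pre_)
def typeOf (s : List (String × String)) : Option String :=
  (s.find? (fun p => p.1 == "type")).map (·.2)

-- the inner 'for section in sections: if …: append; break' is the first match, i.e. find?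
def reorder_sections (sections : List (List (String × String))) : List (List (String × String)) :=
  TARGET_ORDER.foldl (fun ordered target_type =>
    match sections.find? (fun s => typeOf s == some target_type) with
    | some s => ordered ++ [s]
    | none => ordered) []

-- ===== PORT B =====
-- indexing pass: record the FIRST section of each type (missing 'type' = KeyError, excluded by Pre_)
def buildIndex (sections : List (List (String × String))) :
    PySem.Dict String (List (String × String)) :=
  sections.foldl (fun d s =>
    match typeOf s with
    | some t => if d.contains t then d else d.insert t s
    | none => d) PySem.Dict.empty

def reorder_sections_alt (sections : List (List (String × String))) : List (List (String × String)) :=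
  let index := buildIndex sections
  -- [index[t] for t in TARGET_ORDER if t in index]
  TARGET_ORDER.filterMap (fun t => index.get? t)

-- ===== PRECONDITION & SPEC =====
-- Pre_ excludes inputs containing a section without a 'type' key: Python A raises KeyError on
-- almost all of them (B on all of them); on the rare such inputs where A still returns, B raises.
def Pre_reorder_sections (sections : List (List (String × String))) : Prop :=
  (sections.all (fun s => s.any (fun p => p.1 == "type"))) = true
instance (sections : List (List (String × String))) : Decidable (Pre_reorder_sections sections) := by
  unfold Pre_reorder_sections; infer_instance

def pvWitness_reorder_sections : (List (List (String × String))) :=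
  [[("type", "Downloadable"), ("body", "x")], [("type", "key-takeaway")], [("type", "other")]]

def Spec_reorder_sections (sections : List (List (String × String))) (out : List (List (String × String))) : Prop := out = reorder_sections_alt sections
instance (sections : List (List (String × String))) (out : List (List (String × String))) : Decidable (Spec_reorder_sections sections out) := by unfold Spec_reorder_sections; infer_instance

-- ===== CLAIM (what is proved, stated in full; the proofs are below) =====
def Claim_equal_reorder_sections : Prop := ∀ (sections : List (List (String × String))), Dom_reorder_sections sections → Pre_reorder_sections sections → Spec_reorder_sections sections (reorder_sections sections)

-- ===== LEMMAS AND PROOFS =====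

-- the index's lookup is exactly A's inner first-match scan
theorem get?_buildIndex_aux (t : String) (sections : List (List (String × String)))
    (d : PySem.Dict String (List (String × String))) :
    (sections.foldl (fun d s =>
      match typeOf s with
      | some u => if d.contains u then d else d.insert u s
      | none => d) d).get? t
      = ((d.get? t).or (sections.find? (fun s => typeOf s == some t))) := by
  induction sections generalizing d with
  | nil => simp
  | cons s ss ih =>
    simp only [List.foldl_cons, List.find?_cons, ih]
    cases h : typeOf s with
    | none => simp
    | some u =>
      by_cases hc : (d.contains u : Bool)
      · simp only [hc, if_true]
        by_cases hu : u = t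
        · subst hu
          rw [PySem.Dict.contains_eq_isSome_get?] at hc
          cases hg : d.get? u with
          | none => rw [hg] at hc; simp at hc
          | some v => simp
        · have hb : (u == t) = false := beq_eq_false_iff_ne.mpr hu
          simp [hb]
      · simp only [Bool.not_eq_true] at hc
        simp only [hc]
        by_cases hu : u = t
        · subst hu
          rw [PySem.Dict.contains_eq_isSome_get?] at hc
          cases hg : d.get? u with
          | none => simp [PySem.Dict.get?_insert_self]
          | some v => rw [hg] at hc; simp at hc
        · have hne : t ≠ u := fun e => hu e.symm
          have hb : (u == t) = false := beq_eq_false_iff_ne.mpr hu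
          simp [PySem.Dict.get?_insert, hne, hb]

theorem get?_buildIndex (t : String) (sections : List (List (String × String))) :
    (buildIndex sections).get? t = sections.find? (fun s => typeOf s == some t) := by
  simpa using get?_buildIndex_aux t sections PySem.Dict.empty

-- A's outer loop (append on a found match) is filterMap of the first-match function
theorem foldl_match_eq_filterMap (sections : List (List (String × String)))
    (L : List String) (acc : List (List (String × String))) :
    L.foldl (fun ordered target_type =>
      match sections.find? (fun s => typeOf s == some target_type) with
      | some s => ordered ++ [s]
      | none => ordered) acc
      = acc ++ L.filterMap (fun target_type =>
          sections.find? (fun s => typeOf s == some target_type)) := by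
  induction L generalizing acc with
  | nil => simp
  | cons x xs ih =>
    simp only [List.foldl_cons, List.filterMap_cons]
    cases sections.find? (fun s => typeOf s == some x) with
    | none => simp [ih]
    | some s => simp [ih]

-- ===== VERDICT (by name: the statement is the Claim_ definition above) =====
theorem reorder_sections_spec : Claim_equal_reorder_sections := by
  intro sections _ _
  unfold Spec_reorder_sections reorder_sections reorder_sections_alt
  refine (foldl_match_eq_filterMap sections TARGET_ORDER []).trans ?_
  simp only [List.nil_append]
  simp only [get?_buildIndex]
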